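-- pv_equiv track=rewrite | github.com/jguiel/Rosalind_Python_Exercises | rosalind_script.py | rabbit_pop_mortal
-- ===== SOURCE A (Python) =====
-- def rabbit_pop_mortal(months, lifespan):
--     rabbits = [1,1]
--     month = 2
--     while month < months:
--         if month < lifespan:
--             rabbits.append((rabbits[-2]+rabbits[-1]))
--             month += 1
--         elif month == lifespan:
--             rabbits.append(rabbits[-1]+rabbits[-2]-rabbits[-lifespan])
--             month += 1
--         else:
--             rabbits.append((rabbits[-1]+rabbits[-2]-rabbits[-1-lifespan]))
--             month += 1
--     return rabbits[-1]
-- ===== SOURCE B (Python) =====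
-- def rabbit_pop_mortal(months, lifespan):
--     births = [1]   # births[t] = pairs born in month t
--     total = 1      # pairs alive
--     for t in range(months - 1):
--         newborns = total - births[t]          # every pair except the newest breeds
--         dying = births[t + 1 - lifespan] if t + 1 - lifespan >= 0 else 0
--         births.append(newborns)
--         total += newborns - dying
--     return total
-- ===== Notes on version B (the rewrite author's own statement) =====
-- stated objective: alternative
-- what changed: Replaced A's population list with its three-branch windowed subtraction recurrence by a births-sequence dynamic program: track pairs born each month and a running total, deriving newborns as total minus the newest cohort and deaths directly from the birth cohort that reaches the lifespan.
-- intended difference: For lifespan == 1 and months >= 2 A returns 1 forever because its subtraction recurrence degenerates to a constant sequence, while B returns 0: a pair that dies after one month leaves no population, which is the intended mortal-rabbit value. — e.g. on rabbit_pop_mortal(2, 1): A returns 1, B returns 0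
-- outside the precondition, e.g. on rabbit_pop_mortal(5, 0): A returns 1, B raises IndexError
import Mathlib
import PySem

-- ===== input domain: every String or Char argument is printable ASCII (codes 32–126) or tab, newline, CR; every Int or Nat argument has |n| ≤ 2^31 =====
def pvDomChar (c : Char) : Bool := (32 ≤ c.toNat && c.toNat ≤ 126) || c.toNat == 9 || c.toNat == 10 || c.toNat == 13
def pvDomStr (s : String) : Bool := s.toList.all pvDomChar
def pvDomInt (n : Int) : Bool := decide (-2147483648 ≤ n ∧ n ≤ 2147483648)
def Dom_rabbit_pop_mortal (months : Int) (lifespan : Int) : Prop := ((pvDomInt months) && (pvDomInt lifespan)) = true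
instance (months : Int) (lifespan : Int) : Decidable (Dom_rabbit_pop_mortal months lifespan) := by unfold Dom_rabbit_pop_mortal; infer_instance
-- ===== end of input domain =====

-- B replaces A's population list with its three-branch windowed subtraction recurrence
-- by a births-sequence dynamic program with a running total (alternative decomposition,
-- not claimed faster).


-- ===== PORT A =====
-- A's while-loop as fuel recursion; fuel = remaining iterations = (months - month).toNat.
-- rabbits[-k] is ported with PySem.List.pyGetD (default 0); inside Pre_ every index A
-- uses is in range (A raises IndexError only for lifespan ≤ -3, outside Pre_).
def rabbitLoopA (lifespan : Int) : Nat → Int → List Int → List Int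
  | 0, _, rabbits => rabbits
  | (f+1), month, rabbits =>
      if month < lifespan then
        rabbitLoopA lifespan f (month+1)
          (rabbits ++ [PySem.List.pyGetD rabbits (-2) 0 + PySem.List.pyGetD rabbits (-1) 0])
      else if month = lifespan then
        rabbitLoopA lifespan f (month+1)
          (rabbits ++ [PySem.List.pyGetD rabbits (-1) 0 + PySem.List.pyGetD rabbits (-2) 0
                        - PySem.List.pyGetD rabbits (-lifespan) 0])
      else
        rabbitLoopA lifespan f (month+1)
          (rabbits ++ [PySem.List.pyGetD rabbits (-1) 0 + PySem.List.pyGetD rabbits (-2) 0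
                        - PySem.List.pyGetD rabbits (-1-lifespan) 0])

def rabbit_pop_mortal (months : Int) (lifespan : Int) : Int :=
  PySem.List.pyGetD (rabbitLoopA lifespan (months - 2).toNat 2 [1, 1]) (-1) 0

-- ===== PORT B =====
-- B's for-loop as fuel recursion over t = 0 .. months-2; births[t] and the guarded
-- births[t+1-lifespan] are in range whenever Python does not raise (lifespan ≥ 1).
def birthsLoop (lifespan : Int) : Nat → Nat → List Int → Int → Int
  | 0, _, _, total => total
  | (f+1), t, births, total =>
      let newborns := total - PySem.List.pyGetD births (t:Int) 0
      let dying := if 0 ≤ (t:Int) + 1 - lifespan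
                   then PySem.List.pyGetD births ((t:Int) + 1 - lifespan) 0 else 0
      birthsLoop lifespan f (t+1) (births ++ [newborns]) (total + newborns - dying)

def rabbit_pop_mortal_alt (months : Int) (lifespan : Int) : Int :=
  birthsLoop lifespan (months - 1).toNat 0 [1] 1

-- ===== PRECONDITION & SPEC =====
-- Pre_ excludes exactly lifespan ≤ 0 with months ≥ 2: there B's Python indexes a
-- not-yet-recorded birth cohort and raises IndexError, while A returns accidental
-- constant values (or itself raises when lifespan ≤ -3 and months > 2).
def Pre_rabbit_pop_mortal (months : Int) (lifespan : Int) : Prop := 1 ≤ lifespan ∨ months < 2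
instance (months : Int) (lifespan : Int) : Decidable (Pre_rabbit_pop_mortal months lifespan) := by
  unfold Pre_rabbit_pop_mortal; infer_instance

def pvWitness_rabbit_pop_mortal : Int × Int := (6, 3)

-- For lifespan == 1 and months >= 2 A returns 1 forever (its subtraction recurrence
-- degenerates to a constant sequence), while B returns 0: a pair that dies after one
-- month leaves no population, which is the intended mortal-rabbit value.
def D_rabbit_pop_mortal (months : Int) (lifespan : Int) : Prop := 2 ≤ months ∧ lifespan = 1
instance (months : Int) (lifespan : Int) : Decidable (D_rabbit_pop_mortal months lifespan) := by
  unfold D_rabbit_pop_mortal; infer_instance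

def Spec_rabbit_pop_mortal (months : Int) (lifespan : Int) (out : Int) : Prop :=
  ¬ D_rabbit_pop_mortal months lifespan → out = rabbit_pop_mortal_alt months lifespan
instance (months : Int) (lifespan : Int) (out : Int) : Decidable (Spec_rabbit_pop_mortal months lifespan out) := by
  unfold Spec_rabbit_pop_mortal; infer_instance

def pvDiffWitness_rabbit_pop_mortal : Int × Int := (2, 1)
def pvDiffWitnessOut_rabbit_pop_mortal : Int × Int := (1, 0)

-- ===== CLAIM (what is proved, stated in full; the proofs are below) =====
def Claim_unchanged_rabbit_pop_mortal : Prop := ∀ (months : Int) (lifespan : Int), Dom_rabbit_pop_mortal months lifespan → Pre_rabbit_pop_mortal months lifespan → Spec_rabbit_pop_mortal months lifespan (rabbit_pop_mortal months lifespan)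
def Claim_changed_rabbit_pop_mortal : Prop := Dom_rabbit_pop_mortal (pvDiffWitness_rabbit_pop_mortal.1) (pvDiffWitness_rabbit_pop_mortal.2) ∧ Pre_rabbit_pop_mortal (pvDiffWitness_rabbit_pop_mortal.1) (pvDiffWitness_rabbit_pop_mortal.2) ∧ D_rabbit_pop_mortal (pvDiffWitness_rabbit_pop_mortal.1) (pvDiffWitness_rabbit_pop_mortal.2) ∧ rabbit_pop_mortal (pvDiffWitness_rabbit_pop_mortal.1) (pvDiffWitness_rabbit_pop_mortal.2) = pvDiffWitnessOut_rabbit_pop_mortal.1 ∧ rabbit_pop_mortal_alt (pvDiffWitness_rabbit_pop_mortal.1) (pvDiffWitness_rabbit_pop_mortal.2) = pvDiffWitnessOut_rabbit_pop_mortal.2 ∧ pvDiffWitnessOut_rabbit_pop_mortal.1 ≠ pvDiffWitnessOut_rabbit_pop_mortal.2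
def Claim_exact_rabbit_pop_mortal : Prop := ∀ (months : Int) (lifespan : Int), Dom_rabbit_pop_mortal months lifespan → Pre_rabbit_pop_mortal months lifespan → D_rabbit_pop_mortal months lifespan → rabbit_pop_mortal months lifespan ≠ rabbit_pop_mortal_alt months lifespan

-- ===== LEMMAS AND PROOFS =====
-- Proof plan: betaB L k is the number of pairs born at month k; the window vector
-- wv L n (cohorts by age, via betaB) has sum SL L n = β(n) + β(n+1) (wv_sum), the
-- population.  SL_rec shows SL satisfies exactly A's three-branch subtraction
-- recurrence (telescoping identity beta_step), so loopA_inv shows A's list is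
-- (List.range m).map (SL L).  On B's side birthsLoop_inv shows B's births list is
-- (List.range (t+1)).map (betaB L) and its running total SL L t (using SL_shift,
-- births − deaths).  The lifespan = 1 region D_ is handled by loopA_one / beta_L1.

def betaB (L : Nat) : Nat → Int
  | 0 => 1
  | (k+1) => ∑ j ∈ Finset.range (L-1), (if j + 1 ≤ k then betaB L (k-1-j) else 0)
  termination_by n => n
  decreasing_by omega

lemma list_sum_range_eq (f : Nat → Int) (n : Nat) :
    ((List.range n).map f).sum = ∑ j ∈ Finset.range n, f j := by
  induction n with
  | zero => simp
  | succ n ih => rw [List.range_succ, List.map_append, List.sum_append, Finset.sum_range_succ, ih]; simp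

lemma beta_one (L : Nat) : betaB L 1 = 0 := by
  rw [betaB]; simp

lemma beta_two (L : Nat) (hL : 2 ≤ L) : betaB L 2 = 1 := by
  rw [betaB]
  rw [Finset.sum_eq_single 0]
  · simp [betaB]
  · intro j hj hne; simp; omega
  · intro h; simp at h; omega

def padB (L : Nat) (i : Int) : Int := if 0 ≤ i then betaB L i.toNat else 0

lemma padB_natCast (L : Nat) (n : Nat) : padB L (n : Int) = betaB L n := by
  simp [padB]

lemma padB_neg (L : Nat) (i : Int) (h : i < 0) : padB L i = 0 := by
  simp [padB]; omega

lemma beta_sum (L k : Nat) :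
    betaB L (k+1) = ∑ j ∈ Finset.range (L-1), padB L ((k:Int) - 1 - j) := by
  rw [betaB]
  refine Finset.sum_congr rfl ?_
  intro j hj
  by_cases h : j + 1 ≤ k
  · rw [if_pos h, padB]
    rw [if_pos (by omega)]
    congr 1
    omega
  · rw [if_neg h, padB_neg]
    omega

lemma telescope (f : Int → Int) (W : Nat) :
    ∑ j ∈ Finset.range W, (f j - f ((j:Int)+2)) = f 0 + f 1 - f W - f ((W:Int)+1) := by
  induction W with
  | zero => simp
  | succ W ih =>
      rw [Finset.sum_range_succ, ih]
      push_cast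
      have h1 : ((W:Int) + 1 + 1) = (W:Int) + 2 := by ring
      rw [h1]
      ring

lemma beta_step (L k : Nat) (hL : 2 ≤ L) (hk : 1 ≤ k) :
    betaB L (k+2) = betaB L k + padB L ((k:Int)) + padB L ((k:Int)-1)
      - padB L ((k:Int)+1-L) - padB L ((k:Int)-L) := by
  have h2 : betaB L (k+2) = ∑ j ∈ Finset.range (L-1), padB L ((k:Int) - j) := by
    have := beta_sum L (k+1)
    rw [show k+2 = (k+1)+1 from rfl, this]
    refine Finset.sum_congr rfl ?_
    intro j hj
    congr 1
    push_cast
    ring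
  have h0 : betaB L k = ∑ j ∈ Finset.range (L-1), padB L ((k:Int) - 2 - j) := by
    obtain ⟨k', rfl⟩ : ∃ k', k = k' + 1 := ⟨k - 1, by omega⟩
    rw [beta_sum]
    refine Finset.sum_congr rfl ?_
    intro j hj
    congr 1
    push_cast
    ring
  have hk2 : ∑ j ∈ Finset.range (L-1), padB L ((k:Int) - ((j:Int)+2)) = betaB L k := by
    rw [h0]
    refine Finset.sum_congr rfl ?_
    intro j hj
    congr 1
    ring
  have htel := telescope (fun i => padB L ((k:Int) - i)) (L-1)
  simp only at htel
  have hsub : ∑ j ∈ Finset.range (L-1), (padB L ((k:Int) - j) - padB L ((k:Int) - ((j:Int)+2)))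
      = betaB L (k+2) - betaB L k := by
    rw [Finset.sum_sub_distrib, ← h2, hk2]
  rw [htel] at hsub
  have hc : ((L-1 : Nat) : Int) = (L:Int) - 1 := by omega
  rw [hc] at hsub
  have e1 : ((k:Int) - ((L:Int)-1)) = (k:Int)+1-L := by ring
  have e2 : ((k:Int) - (((L:Int)-1)+1)) = (k:Int)-L := by ring
  rw [e1, e2] at hsub
  have p1 : ((k:Int) - 0) = ((k:Int)) := by ring
  rw [p1] at hsub
  omega

def winF (L n i : Nat) : Int := if i ≤ n then betaB L (n-i) else 0
def wv (L n : Nat) : List Int := (List.range L).map (winF L n)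
def SL (L n : Nat) : Int := (wv L n).sum

lemma wv_cons (L n : Nat) (hL : 1 ≤ L) :
    wv L n = winF L n 0 :: (List.range (L-1)).map (fun j => winF L n (j+1)) := by
  unfold wv
  obtain ⟨L', rfl⟩ : ∃ L', L = L' + 1 := ⟨L - 1, by omega⟩
  rw [List.range_succ_eq_map, List.map_cons, List.map_map]
  simp [Function.comp_def]

lemma wv_tail_sum (L n : Nat) :
    ((List.range (L-1)).map (fun j => winF L n (j+1))).sum = betaB L (n+1) := by
  rw [list_sum_range_eq, betaB]
  refine Finset.sum_congr rfl ?_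
  intro j hj
  unfold winF
  by_cases h : j + 1 ≤ n
  · rw [if_pos h, if_pos h]
    congr 1
    omega
  · rw [if_neg h, if_neg h]

lemma wv_sum (L n : Nat) (hL : 1 ≤ L) : SL L n = betaB L n + betaB L (n+1) := by
  unfold SL
  rw [wv_cons L n hL, List.sum_cons, wv_tail_sum L n]
  unfold winF
  simp

lemma SL_zero (L : Nat) (hL : 1 ≤ L) : SL L 0 = 1 := by
  rw [wv_sum L 0 hL, beta_one, betaB]
  norm_num
lemma SL_one (L : Nat) (hL : 2 ≤ L) : SL L 1 = 1 := by
  rw [wv_sum L 1 (by omega), beta_one, beta_two L hL]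
  norm_num

lemma SL_rec (L m : Nat) (hL : 2 ≤ L) (hm : 2 ≤ m) :
    SL L m = SL L (m-1) + SL L (m-2) - (padB L ((m:Int)-L) + padB L ((m:Int)-1-L)) := by
  have h1 : 1 ≤ L := by omega
  obtain ⟨k, rfl⟩ : ∃ k, m = k + 2 := ⟨m - 2, by omega⟩
  rw [wv_sum L (k+2) h1]
  rw [show k+2-1 = k+1 from rfl, show k+2-2 = k from rfl]
  rw [wv_sum L (k+1) h1, wv_sum L k h1]
  have hstep := beta_step L (k+1) hL (by omega)
  have e1 : ((k+1:Nat):Int) = (k:Int)+1 := by push_cast; ring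
  rw [e1] at hstep
  have e2 : ((k:Int)+1) = ((k+1:Nat):Int) := by push_cast; ring
  have hp1 : padB L ((k:Int)+1) = betaB L (k+1) := by rw [e2, padB_natCast]
  have hp0 : padB L ((k:Int)+1-1) = betaB L k := by
    rw [show ((k:Int)+1-1) = (k:Int) from by ring, padB_natCast]
  rw [hp1, hp0] at hstep
  have g1 : ((k+2:Nat):Int) - L = (k:Int)+1+1-L := by push_cast; ring
  have g2 : ((k+2:Nat):Int) - 1 - L = (k:Int)+1-L := by push_cast; ring
  rw [g1, g2]
  rw [show k+1+2 = k+3 from rfl] at hstep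
  rw [show k+2+1 = k+3 from rfl, show k+1+1 = k+2 from rfl]
  omega
lemma getS (L m k : Nat) (hk : 0 < k) (hkm : k ≤ m) :
    PySem.List.pyGetD ((List.range m).map (SL L)) (-(k:Int)) 0 = SL L (m - k) := by
  rw [PySem.List.pyGetD_neg_natCast _ _ _ hk (by simpa using hkm)]
  simp

lemma loopA_inv (L : Nat) (hL : 2 ≤ L) :
    ∀ (fuel m : Nat), 2 ≤ m →
    rabbitLoopA (L:Int) fuel (m:Int) ((List.range m).map (SL L)) = (List.range (m+fuel)).map (SL L) := by
  intro fuel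
  induction fuel with
  | zero => intro m hm; simp [rabbitLoopA]
  | succ f ih =>
      intro m hm
      have h1 : PySem.List.pyGetD ((List.range m).map (SL L)) (-1) 0 = SL L (m-1) := by
        rw [show (-1:Int) = -((1:Nat):Int) from by norm_num]
        exact getS L m 1 (by omega) (by omega)
      have h2 : PySem.List.pyGetD ((List.range m).map (SL L)) (-2) 0 = SL L (m-2) := by
        rw [show (-2:Int) = -((2:Nat):Int) from by norm_num]
        exact getS L m 2 (by omega) (by omega)
      have hlist : ((List.range m).map (SL L)) ++ [SL L m] = (List.range (m+1)).map (SL L) := by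
        rw [List.range_succ, List.map_append]
        rfl
      have hmonth : ((m:Int)+1) = ((m+1:Nat):Int) := by push_cast; ring
      have hplus : m+1+f = m+(f+1) := by omega
      rw [rabbitLoopA]
      by_cases hml : m < L
      · rw [if_pos (by exact_mod_cast hml)]
        rw [h1, h2]
        have hv : SL L (m-2) + SL L (m-1) = SL L m := by
          rw [SL_rec L m hL hm, padB_neg _ _ (by omega), padB_neg _ _ (by omega)]
          ring
        rw [hv, hlist, hmonth, ih (m+1) (by omega), hplus]
      · by_cases hme : m = L
        · rw [if_neg (by exact_mod_cast hml), if_pos (by exact_mod_cast hme)]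
          rw [h1, h2]
          have h3 : PySem.List.pyGetD ((List.range m).map (SL L)) (-(L:Int)) 0 = SL L (m - L) := by
            exact getS L m L (by omega) (by omega)
          rw [h3]
          have hv : SL L (m-1) + SL L (m-2) - SL L (m - L) = SL L m := by
            rw [SL_rec L m hL hm]
            have e0 : padB L ((m:Int) - L) = 1 := by
              rw [show ((m:Int) - L) = ((0:Nat):Int) from by omega, padB_natCast]
              rw [betaB]
            have e1 : padB L ((m:Int) - 1 - L) = 0 := padB_neg _ _ (by omega)
            rw [e0, e1, show m - L = 0 from by omega, SL_zero L (by omega)]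
            ring
          rw [hv, hlist, hmonth, ih (m+1) (by omega), hplus]
        · rw [if_neg (by exact_mod_cast hml), if_neg (by
            intro h; exact hme (by exact_mod_cast h))]
          have hLm : L < m := by omega
          have h3 : PySem.List.pyGetD ((List.range m).map (SL L)) (-1-(L:Int)) 0 = SL L (m - (L+1)) := by
            rw [show (-1-(L:Int)) = -(((L+1:Nat)):Int) from by push_cast; ring]
            exact getS L m (L+1) (by omega) (by omega)
          rw [h1, h2, h3]
          have hv : SL L (m-1) + SL L (m-2) - SL L (m - (L+1)) = SL L m := by
            rw [SL_rec L m hL hm]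
            have e0 : ((m:Int) - L) = ((m - L : Nat) : Int) := by omega
            have e1 : ((m:Int) - 1 - L) = ((m - (L+1) : Nat) : Int) := by omega
            rw [e0, e1, padB_natCast, padB_natCast]
            rw [wv_sum L (m - (L+1)) (by omega)]
            rw [show m - (L+1) + 1 = m - L from by omega]
            ring
          rw [hv, hlist, hmonth, ih (m+1) (by omega), hplus]

lemma init_list (L : Nat) (hL : 2 ≤ L) : ([1, 1] : List Int) = (List.range 2).map (SL L) := by
  have h0 := SL_zero L (by omega)
  have h1 := SL_one L hL
  simp [List.range_succ, h0, h1]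

lemma A_result (months : Int) (L : Nat) (hL : 2 ≤ L) :
    rabbit_pop_mortal months (L:Int) = SL L (1 + (months - 2).toNat) := by
  unfold rabbit_pop_mortal
  rw [init_list L hL, show (2:Int) = ((2:Nat):Int) from rfl]
  rw [loopA_inv L hL (months - ((2:Nat):Int)).toNat 2 (by omega)]
  rw [show (-1:Int) = -((1:Nat):Int) from by norm_num,
      getS L (2 + (months - ((2:Nat):Int)).toNat) 1 (by omega) (by omega)]
  congr 1
  omega

lemma SL_pad (L n : Nat) : SL L n = ∑ i ∈ Finset.range L, padB L ((n:Int) - i) := by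
  unfold SL wv
  rw [list_sum_range_eq]
  refine Finset.sum_congr rfl ?_
  intro i hi
  unfold winF padB
  by_cases h : i ≤ n
  · rw [if_pos h, if_pos (by omega)]
    congr 1
    omega
  · rw [if_neg h, if_neg (by omega)]

lemma SL_shift (L n : Nat) (hL : 1 ≤ L) :
    SL L (n+1) = SL L n + betaB L (n+1) - padB L ((n:Int)+1-L) := by
  obtain ⟨W, rfl⟩ : ∃ W, L = W + 1 := ⟨L - 1, by omega⟩
  rw [SL_pad (W+1) (n+1), SL_pad (W+1) n]
  rw [Finset.sum_range_succ', Finset.sum_range_succ]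
  have h1 : ∑ i ∈ Finset.range W, padB (W+1) (((n+1:Nat):Int) - ((i+1:Nat):Int))
      = ∑ i ∈ Finset.range W, padB (W+1) ((n:Int) - i) := by
    refine Finset.sum_congr rfl ?_
    intro i hi
    congr 1
    push_cast
    ring
  rw [h1]
  have h2 : padB (W+1) (((n+1:Nat):Int) - ((0:Nat):Int)) = betaB (W+1) (n+1) := by
    rw [show (((n+1:Nat):Int) - ((0:Nat):Int)) = ((n+1:Nat):Int) from by push_cast; ring,
        padB_natCast]
  rw [h2]
  have h3 : padB (W+1) ((n:Int)+1-((W+1:Nat):Int)) = padB (W+1) ((n:Int) - W) := by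
    congr 1
    push_cast
    ring
  rw [h3]
  ring

lemma birthsLoop_inv (L : Nat) (hL : 1 ≤ L) :
    ∀ (fuel t : Nat),
    birthsLoop (L:Int) fuel t ((List.range (t+1)).map (betaB L)) (SL L t) = SL L (t + fuel) := by
  intro fuel
  induction fuel with
  | zero => intro t; simp [birthsLoop]
  | succ f ih =>
      intro t
      have hplus : t+1+f = t+(f+1) := by omega
      simp only [birthsLoop]
      have hb : PySem.List.pyGetD ((List.range (t+1)).map (betaB L)) ((t:Nat):Int) 0 = betaB L t := by
        rw [PySem.List.pyGetD_natCast]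
        simp
      have hnew : SL L t - betaB L t = betaB L (t+1) := by
        rw [wv_sum L t hL]
        ring
      have hdy : (if 0 ≤ (t:Int) + 1 - (L:Int)
            then PySem.List.pyGetD ((List.range (t+1)).map (betaB L)) ((t:Int)+1-(L:Int)) 0 else 0)
          = padB L ((t:Int)+1-L) := by
        by_cases h : 0 ≤ (t:Int)+1-(L:Int)
        · rw [if_pos h, PySem.List.pyGetD_eq_getElem _ _ h (by simp; omega)]
          simp only [List.getElem_map, List.getElem_range]
          rw [padB, if_pos h]
        · rw [if_neg h, padB_neg _ _ (by omega)]
      rw [hb, hnew, hdy]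
      have hlist : ((List.range (t+1)).map (betaB L)) ++ [betaB L (t+1)]
          = (List.range (t+2)).map (betaB L) := by
        conv_rhs => rw [show t+2 = (t+1)+1 from rfl, List.range_succ, List.map_append]
        rfl
      have htot : SL L t + betaB L (t+1) - padB L ((t:Int)+1-L) = SL L (t+1) :=
        (SL_shift L t hL).symm
      rw [hlist, htot, ih (t+1), hplus]

lemma B_result (months : Int) (L : Nat) (hL : 1 ≤ L) :
    rabbit_pop_mortal_alt months (L:Int) = SL L ((months - 1).toNat) := by
  unfold rabbit_pop_mortal_alt
  have h0 : ([1] : List Int) = (List.range 1).map (betaB L) := by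
    rw [List.range_one, List.map_cons, List.map_nil, betaB]
  set M := (months - 1).toNat
  rw [h0, show (1:Int) = SL L 0 from (SL_zero L hL).symm]
  have key := birthsLoop_inv L hL M 0
  simpa using key

lemma AB_eq (months lifespan : Int) (hpre : 2 ≤ lifespan) :
    rabbit_pop_mortal months lifespan = rabbit_pop_mortal_alt months lifespan := by
  obtain ⟨L, rfl⟩ : ∃ L : Nat, lifespan = (L:Int) := ⟨lifespan.toNat, by omega⟩
  have hL : 2 ≤ L := by omega
  rw [A_result months L hL, B_result months L (by omega)]
  by_cases hm : 2 ≤ months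
  · rw [show 1 + (months - 2).toNat = (months - 1).toNat from by omega]
  · rw [show (months - 2).toNat = 0 from by omega, show (months - 1).toNat = 0 from by omega]
    rw [SL_zero L (by omega), SL_one L hL]

lemma loopA_one (fuel : Nat) : ∀ (m : Int) (pre : List Int), 2 ≤ m →
    ∃ pre', rabbitLoopA 1 fuel m (pre ++ [1, 1]) = pre' ++ [1, 1] := by
  induction fuel with
  | zero => intro m pre hm; exact ⟨pre, rfl⟩
  | succ f ih =>
      intro m pre hm
      rw [rabbitLoopA, if_neg (by omega), if_neg (by omega)]
      have hg1 : PySem.List.pyGetD (pre ++ [1, 1]) (-1) 0 = (1:Int) := by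
        rw [show pre ++ [1, 1] = (pre ++ [1]) ++ [1] from by simp]
        exact PySem.List.pyGetD_neg_one_append_singleton _ _ _
      have hv : PySem.List.pyGetD (pre ++ [1, 1]) (-1) 0 + PySem.List.pyGetD (pre ++ [1, 1]) (-2) 0
          - PySem.List.pyGetD (pre ++ [1, 1]) (-1-1) 0 = 1 := by
        rw [show (-1-1 : Int) = -2 from by norm_num, hg1]
        ring
      rw [hv, show pre ++ [1, 1] ++ [1] = (pre ++ [1]) ++ [1, 1] from by simp]
      exact ih (m+1) (pre ++ [1]) (by omega)

lemma A_one (months : Int) : rabbit_pop_mortal months 1 = 1 := by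
  unfold rabbit_pop_mortal
  obtain ⟨pre', hp⟩ := loopA_one (months - 2).toNat 2 [] (by omega)
  simp only [List.nil_append] at hp
  rw [hp, show pre' ++ [1, 1] = (pre' ++ [1]) ++ [1] from by simp]
  exact PySem.List.pyGetD_neg_one_append_singleton _ _ _

lemma beta_L1 (k : Nat) : betaB 1 (k+1) = 0 := by
  rw [betaB]
  simp

lemma B_one (months : Int) (hm : 2 ≤ months) : rabbit_pop_mortal_alt months 1 = 0 := by
  rw [show (1:Int) = ((1:Nat):Int) from by norm_num, B_result months 1 (le_refl 1)]
  obtain ⟨k, hk⟩ : ∃ k, (months - 1).toNat = k + 1 := ⟨(months - 1).toNat - 1, by omega⟩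
  rw [hk, wv_sum 1 (k+1) (le_refl 1), beta_L1, show k+1+1 = (k+1)+1 from rfl, beta_L1]
  norm_num
lemma small_months (months lifespan : Int) (hm : months < 2) :
    rabbit_pop_mortal months lifespan = rabbit_pop_mortal_alt months lifespan := by
  unfold rabbit_pop_mortal rabbit_pop_mortal_alt
  rw [show (months - 2).toNat = 0 from by omega, show (months - 1).toNat = 0 from by omega]
  rfl

-- ===== VERDICT (by name: the statement is the Claim_ definition above) =====
theorem rabbit_pop_mortal_spec : Claim_unchanged_rabbit_pop_mortal := by
  intro months lifespan hdom hpre hnd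
  unfold Pre_rabbit_pop_mortal at hpre
  unfold D_rabbit_pop_mortal at hnd
  show rabbit_pop_mortal months lifespan = rabbit_pop_mortal_alt months lifespan
  by_cases hls : 1 ≤ lifespan
  case neg => exact small_months months lifespan (hpre.resolve_left hls)
  by_cases hl : lifespan = 1
  · subst hl
    have hm : months < 2 := by by_contra h; exact hnd ⟨by omega, rfl⟩
    rw [A_one, show (1:Int) = ((1:Nat):Int) from by norm_num,
        B_result months 1 (le_refl 1), show (months - 1).toNat = 0 from by omega,
        SL_zero 1 (le_refl 1)]
    norm_num
  · exact AB_eq months lifespan (by omega)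

theorem rabbit_pop_mortal_changed : Claim_changed_rabbit_pop_mortal := by
  unfold Claim_changed_rabbit_pop_mortal; decide

theorem rabbit_pop_mortal_tight : Claim_exact_rabbit_pop_mortal := by
  intro months lifespan hdom hpre hd
  obtain ⟨hm, hl⟩ := hd
  subst hl
  rw [A_one, B_one months hm]
  norm_num
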